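/-
  A SECOND SMALL WORKED EXAMPLE THROUGH THE VERIFICATION-CONDITION GENERATOR: `crc32_update` of `proofs/c/toy1.c` (38 bytes at 1000F8H of
  toy1.bin = of inflate4.bin, its 1 KB table in
  .rodata at 100440H) computes the CRC-32 table recurrence — on the model, through `v3_walk`. The theorem `crc32_update_correct_vc`: from the
  entry with c, p, len in edi, rsi, rdx, the run reaches the return address with rax = `crc32Run c (the len bytes at p)`, memory untouched.
  The walk steps the 8 instructions of the loop body (movzx / xor / movzx / shr / xor [table] / add / cmp / jb) and discharges the two
  loads' side conditions; what is written by hand is the word-level meaning of the body (section `Crc`) and the invariant.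
-/
import X86.Derived.Prog.Walk
import X86.Derived.Prog.FrameTac
import X86.Derived.Prog.AluLemmas
import X86.Derived.Prog.Arrays
import Prog.Toy1Bytes
import Gzip.Spec.Crc32

namespace X86.Vc
open X86.User (CodeAt RegsKept Span FlagsOK Layout toNat_add_ofNat toNat_ofNat_lt' add_ofNat_add)
open X86 Toy1Bytes Word

set_option maxRecDepth 10000
set_option maxHeartbeats 4000000
set_option linter.unusedSimpArgs false
set_option linter.unusedVariables false

namespace Crc

/-! ### Word-level facts: 32-bit and 8-bit values zero-extended in 64-bit registers -/

theorem xor_ext (a b : UInt32) : a.toUInt64 ^^^ b.toUInt64 = (a ^^^ b).toUInt64 := by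
  apply UInt64.toNat_inj.mp
  simp [UInt64.toNat_xor, UInt32.toNat_toUInt64, UInt32.toNat_xor]

theorem byte_ext (b : UInt8) : b.toUInt64 = b.toUInt32.toUInt64 := by
  apply UInt64.toNat_inj.mp; simp

theorem low8_ext (a : UInt32) : Word.low .w8 a.toUInt64 = a.toUInt8.toUInt64 := by word_omega
theorem ofNat_toNat32 (a : UInt32) : UInt64.ofNat a.toNat = a.toUInt64 := by word_omega

theorem shr32_8 (a : UInt32) : (Word.shift .shr .w32 a.toUInt64 8) = (a >>> 8).toUInt64 := by
  have hc : Word.shiftCount .w32 8 = 8 := by decide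
  rw [Word.shift_shr_val_nat .w32 _ _ (by decide), hc]
  simp [Width.bits]; word_omega

/-! ### The table in memory -/

/-- The little-endian word at index `k` of the table image. -/
def tblWord (k : Nat) : Nat :=
  (crc_table_bytes.getD (4 * k) 0).toNat + 256 * ((crc_table_bytes.getD (4 * k + 1) 0).toNat +
    256 * ((crc_table_bytes.getD (4 * k + 2) 0).toNat + 256 * ((crc_table_bytes.getD (4 * k + 3) 0).toNat + 256 * 0)))

set_option maxRecDepth 1000000 in
theorem tblWord_eq : ∀ k, (h : k < 256) → tblWord k = (Gzip.crc32TableLit[k]'(by exact h)).toNat := by decide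

theorem tblWord_entry (k : UInt8) : tblWord k.toNat = (Gzip.crc32TableEntry k).toNat := by
  rw [tblWord_eq _ k.toNat_lt, Gzip.crc32TableLit_getElem _ k.toNat_lt]
  simp

theorem tbl_addr (k : UInt8) (j : Nat) (hj : j < 4) :
    k.toUInt64 * 4 + 0x100440 + UInt64.ofNat j = 0x100440 + UInt64.ofNat (4 * k.toNat + j) := by
  have := k.toNat_lt; word_omega

/-- `crc_table[k]` as the machine reads it (`xor eax, [rcx*4 + 100440H]`). -/
theorem table_read {μ : User.Mem} (h : CodeAt μ 0x100440 crc_table_bytes) (k : UInt8) :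
    μ.readLE (k.toUInt64 * 4 + 0x100440) 4 = (Gzip.crc32TableEntry k).toNat := by
  have hk := k.toNat_lt
  have hl : crc_table_bytes.length = 1024 := rfl
  have e0 := tbl_addr k 0 (by omega)
  have e1 := tbl_addr k 1 (by omega)
  have e2 := tbl_addr k 2 (by omega)
  have e3 := tbl_addr k 3 (by omega)
  simp only [UInt64.reduceOfNat, UInt64.add_zero, Nat.add_zero] at e0 e1 e2 e3
  have a2 : k.toUInt64 * 4 + 0x100440 + 1 + 1 = k.toUInt64 * 4 + 0x100440 + 2 := by rw [UInt64.add_assoc]; rfl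
  have a3 : k.toUInt64 * 4 + 0x100440 + 2 + 1 = k.toUInt64 * 4 + 0x100440 + 3 := by rw [UInt64.add_assoc]; rfl
  rw [← tblWord_entry]
  simp only [User.Mem.readLE, a2, a3]
  rw [e3, e2, e1, e0, User.CodeAt.getD h _ (by omega), User.CodeAt.getD h _ (by omega), User.CodeAt.getD h _ (by omega), User.CodeAt.getD h _ (by omega)]
  rfl

/-- One byte of the recurrence, as the machine computes it. -/
theorem crc_step_eq (cr : UInt32) (b : UInt8) :
    (cr >>> 8 ^^^ Gzip.crc32TableEntry (b.toUInt32 ^^^ cr).toUInt8) = Gzip.crc32UpdateBit cr b := by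
  rw [Gzip.crc32UpdateBit_eq_entry, UInt32.xor_comm b.toUInt32 cr, UInt32.xor_comm]

/-- **What the loop body leaves in eax**, in the form the walk hands it over. -/
theorem body_value {μ : User.Mem} (h : CodeAt μ 0x100440 crc_table_bytes) (cr : UInt32) (a : Word) :
    Word.low .w32 ((Word.shift .shr .w32 (Word.low .w32 cr.toUInt64) 8) ^^^
      UInt64.ofNat (μ.readLE (Word.low .w8 (UInt64.ofNat (μ.readLE a 1) ^^^ cr.toUInt64) * 4 + 0x100440) 4)) =
    (Gzip.crc32UpdateBit cr (μ.read a)).toUInt64 := by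
  rw [ofNat_readLE_one, byte_ext, xor_ext, low8_ext, table_read h, ofNat_toNat32, Word.low_u32, shr32_8, xor_ext, Word.low_u32, crc_step_eq]

end Crc
open Crc

/-- What `crc32_update` needs of its caller; the buffer and the return slot lie in the user region (at or above 1 MB: `bufOut`, `spOut`). Only the low 32 bits of
rdi are the argument `c`. The function reads `len` bytes at `p` and its table; it writes nothing. -/
structure CrcPre (n : User.Layout) (v0 : User.State) (c : UInt32) (p len ret : Word) : Prop where
  code : CodeAt v0.mem 0x1000f8 crc32_update_bytes
  table : CodeAt v0.mem 0x100440 crc_table_bytes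
  mapped : 0x200000 ≤ n.pages * 0x200000
  nle : n.pages ≤ 512
  rip : v0.rip = 0x1000f8
  rdi : Word.low .w32 (v0.reg .rdi) = c.toUInt64
  rsi : v0.reg .rsi = p
  rdx : v0.reg .rdx = len
  sp : User.inRange n.pages (v0.reg .rsp) 8
  spOut : 0x100000 ≤ (v0.reg .rsp).toNat
  retAddr : UInt64.ofNat (v0.mem.readLE (v0.reg .rsp) 8) = ret
  retlt : ret < 0x40000000
  bufR : User.inRange n.pages p len.toNat
  bufOut : 0x100000 ≤ p.toNat

/-- The loop invariant at 100118H (`cmp rdi, rdx`), after `i` bytes: what changed is rax, rcx, rdi. -/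
structure CrcInv (v0 : User.State) (c : UInt32) (p len : Word) (i : Nat) (v : User.State) : Prop where
  rip : v.rip = 0x100118
  rax : v.reg .rax = (Gzip.crc32Run c (v0.mem.readBytes p i)).toUInt64
  rdi : v.reg .rdi = UInt64.ofNat i
  ile : i ≤ len.toNat
  kept : RegsKept [.rax, .rcx, .rdi] v0 v
  mem : v.mem = v0.mem

variable {n : User.Layout} {v0 : User.State} {c : UInt32} {p len ret : Word}

theorem CrcPre.fetch (hp : CrcPre n v0 c p len ret) (a : Word) (ha : 0x100000 ≤ a.toNat ∧ a.toNat + 15 ≤ 0x200000) : n.Has a 15 := by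
  have := hp.mapped; unfold User.Layout.Has User.Layout.lo User.Layout.hi; omega

/-- One trip round the loop, or out of it (at the `ret`, 10011DH). -/
theorem crc_body (hp : CrcPre n v0 c p len ret) (i : Nat) (v : User.State) (hi : CrcInv v0 c p len i v) :
    Reach n v (fun v' => (v'.rip = 0x10011d ∧ RegsKept [.rax, .rcx, .rdi] v0 v' ∧ v'.mem = v0.mem ∧
        v'.reg .rax = (Gzip.crc32Run c (v0.mem.readBytes p len.toNat)).toUInt64) ∨
      (CrcInv v0 c p len (i + 1) v' ∧ len.toNat - (i + 1) < len.toNat - i)) := by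
  v3_open hp hi
  have hcode : CodeAt v.mem 0x1000f8 crc32_update_bytes := by rw [hi_mem]; exact hp_code
  have htab : CodeAt v.mem 0x100440 crc_table_bytes := by rw [hi_mem]; exact hp_table
  generalize hcr : Gzip.crc32Run c (v0.mem.readBytes p i) = cr at hi_rax
  v3_walk hcode hp.fetch [] until [0x100118, 0x10011d]
  · refine Reach.done (Or.inr ⟨⟨by simp, ?_, by simp [UInt64.ofNat_add], by v3_omega, by v3_kept, by simp [hi_mem]⟩, by v3_omega⟩)
    simp only [User.State.reg_setReg, User.State.reg_setRip, User.State.reg_setFlags, reduceCtorEq, if_true, if_false]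
    rw [body_value htab, User.Mem.readBytes_succ_snoc, Gzip.crc32Run_append, hcr, hi_mem]; rfl
  · have : i = len.toNat := by v3_omega
    exact Reach.done (Or.inl ⟨by simp, by v3_kept, by simp [hi_mem], by simp [hi_rax, ← hcr, this]⟩)

/-- **`crc32_update` is correct** (view level). -/
theorem crc32_update_reach (hp : CrcPre n v0 c p len ret) :
    Reach n v0 (fun v' => v'.rip = ret ∧ v'.reg .rsp = v0.reg .rsp + 8 ∧
      v'.reg .rax = (Gzip.crc32Run c (v0.mem.readBytes p len.toNat)).toUInt64 ∧ v'.mem = v0.mem ∧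
      ∀ r, r ≠ .rax → r ≠ .rcx → r ≠ .rdi → r ≠ .rsp → v'.reg r = v0.reg r) := by
  v3_open hp
  v3_walk hp_code hp.fetch [] until [0x100118]
  refine Reach.trans (Reach.loop (Inv := fun v => ∃ i, CrcInv v0 c p len i v)
    (Post := fun v => v.rip = 0x10011d ∧ RegsKept [.rax, .rcx, .rdi] v0 v ∧ v.mem = v0.mem ∧
      v.reg .rax = (Gzip.crc32Run c (v0.mem.readBytes p len.toNat)).toUInt64) (fun v => len.toNat - (v.reg .rdi).toNat) ?_ _ ?_) ?_
  · intro v ⟨i, hi⟩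
    refine (crc_body hp i v hi).mono fun v' h => h.imp id fun ⟨hi', hlt⟩ => ⟨⟨_, hi'⟩, ?_⟩
    have := hi.ile; have := hi'.ile; rw [hi'.rdi, hi.rdi]; word_omega
  · exact ⟨0, by simp, by simp [User.Mem.readBytes, Gzip.crc32Run, hp_rdi], by simp, by omega, by v3_kept, rfl⟩
  · intro v ⟨hrip, hk, hmem, hrax⟩
    have hcode : CodeAt v.mem 0x1000f8 crc32_update_bytes := by rw [hmem]; exact hp_code
    have hret : UInt64.ofNat (v.mem.readLE (v0.reg .rsp) 8) = ret := by rw [hmem]; exact hp_retAddr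
    v3_walk hcode hp.fetch [hret, hp_retlt]
    exact Reach.done ⟨by simp [hret], by simp [hk.get .rsp rfl], by simp [hrax], by simp [hmem],
      fun r h1 h2 h3 h4 => by simp [h4, hk r (by simp [Reg.isIn, h1.symm, h2.symm, h3.symm])]⟩

/-- **`crc32_update` is correct on the model** (machine level) — through the VC generator and the flat user machine; the statement is
about `X86.run` of the full machine (see `byte_copy_correct_vc`). -/
theorem crc32_update_correct_vc {n : User.Layout} (μ : Microarch) (hμ : MicroOK μ) (m : Machine) (v0 : User.State) (ha : User.Abs n m v0)
    (c : UInt32) (p len ret : Word) (hp : CrcPre n v0 c p len ret) :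
    ∃ k m' v', _root_.X86.run (Dec.decoder μ (Dec.mkTable X86.allRows)) m k = .next m' ∧ User.Abs n m' v' ∧
      v'.rip = ret ∧ v'.reg .rsp = v0.reg .rsp + 8 ∧
      v'.reg .rax = (Gzip.crc32Run c (v0.mem.readBytes p len.toNat)).toUInt64 ∧ v'.mem = v0.mem ∧
      (∀ r, r ≠ .rax → r ≠ .rcx → r ≠ .rdi → r ≠ .rsp → v'.reg r = v0.reg r) ∧
      m'.sysPart = m.sysPart := by
  obtain ⟨k, m', v', h1, h2, ⟨h3, h4, h5, h6, h7⟩, h8⟩ := (crc32_update_reach hp).sound μ hμ m ha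
  exact ⟨k, m', v', h1, h2, h3, h4, h5, h6, h7, h8⟩

/-- **The same theorem with nothing of the user view in the conclusion** (see `byte_copy_correct_machine`). -/
theorem crc32_update_correct_machine {n : User.Layout} (μ : Microarch) (hμ : MicroOK μ) (m : Machine) (hb : User.Base n m)
    (c : UInt32) (p len ret : Word) (hp : CrcPre n (User.State.ofMachine m) c p len ret) :
    ∃ k m', _root_.X86.run (Dec.decoder μ (Dec.mkTable X86.allRows)) m k = .next m' ∧ User.Base n m' ∧
      m'.rip = ret ∧ m'.reg .rsp = m.reg .rsp + 8 ∧
      m'.reg .rax = (Gzip.crc32Run c ((User.Mem.ofPhys m.phys).readBytes p len.toNat)).toUInt64 ∧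
      (∀ a, n.user a → m'.phys.read a = m.phys.read a) ∧
      (∀ r, r ≠ .rax → r ≠ .rcx → r ≠ .rdi → r ≠ .rsp → m'.reg r = m.reg r) ∧
      m'.sysPart = m.sysPart := by
  obtain ⟨k, m', v', hrun, ha', h1, h2, h3, h4, h5, hsys⟩ :=
    crc32_update_correct_vc μ hμ m _ (User.Abs.of_base hb) c p len ret hp
  refine ⟨k, m', hrun, ha'.base, ha'.rip.trans h1, (ha'.reg .rsp).trans h2, (ha'.reg .rax).trans h3, ?_, ?_, hsys⟩
  · intro a hu
    rw [ha'.mem a hu, h4]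
    rfl
  · intro r r1 r2 r3 r4
    exact (ha'.reg r).trans (h5 r r1 r2 r3 r4)

end X86.Vc
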